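-- pv_equiv track=rewrite | github.com/varjolab/Proteogyver | app/components/parsing.py | check_required_columns
-- ===== SOURCE A (Python) =====
-- from typing import Any, Dict, List, Tuple, Union, Optional, Set
--
-- def check_sample_table_column(column: str, accepted_values: List[str]) -> Optional[str]:
--     """Checks if a column name matches any accepted values.
--
--     Args:
--         column (str): Column name to check
--         accepted_values (list): List of valid column name variations
--
--     Returns:
--         str: Original column name if match found, None otherwise
--
--     Notes:
--         - Case-insensitive matching
--         - Returns exact original column name if match found
--     """
--     for candidate in accepted_values:
--         if candidate == column.lower():
--             return column
--     return None
--
-- def check_required_columns(columns: List[str]) -> Tuple[Dict[str, str], Set[str]]: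
--     """Validates presence of required columns in sample table.
--
--     Args:
--         columns (list): List of column names to check
--
--     Returns:
--         tuple: Contains:
--             - dict: Mapping of standardized names to actual column names
--             - set: Set of required column types that were found
--
--     Notes:
--         - Required columns: sample name, sample group
--         - Optional columns: bait uniprot/id
--         - Case-insensitive matching of column names
--     """
--     reqs_found: set = set()
--     needed_sample_info_columns: set = {('req', ('sample name', 'sample_name')), ('req', (
--         'sample group', 'sample_group')), ('opt', ('bait uniprot', 'bait_uniprot', 'bait_id', 'bait id'))}
--     infodict: dict = {}
--     for n in needed_sample_info_columns:
--         for c in columns: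
--             found: str = check_sample_table_column(c, n[1])
--             if found is not None:
--                 valname: str = n[1][0]
--                 infodict[valname] = found
--                 if n[0] == 'req':
--                     reqs_found.add(valname)
--                 break
--     return (infodict, reqs_found)
-- ===== SOURCE B (Python) =====
-- def check_required_columns(columns):
--     categories = [
--         ("sample name", True, ("sample name", "sample_name")),
--         ("sample group", True, ("sample group", "sample_group")),
--         ("bait uniprot", False, ("bait uniprot", "bait_uniprot", "bait_id", "bait id")),
--     ]
--     index = {}
--     for valname, is_req, names in categories:
--         for name in names:
--             index[name] = valname
--     found = {}
--     for column in columns: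
--         valname = index.get(column.lower())
--         if valname is not None and valname not in found:
--             found[valname] = column
--     infodict = {valname: found[valname] for valname, _, _ in categories if valname in found}
--     reqs_found = {valname for valname, is_req, _ in categories if is_req and valname in found}
--     return (infodict, reqs_found)
-- ===== Notes on version B (the rewrite author's own statement) =====
-- stated objective: faster
-- what changed: Replaced A's three category-by-category rescans of the column list (each with an inner scan over accepted name variants) by a precomputed lowercase-name-to-category dict and a single first-match-wins pass over the columns.
import Mathlib
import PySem

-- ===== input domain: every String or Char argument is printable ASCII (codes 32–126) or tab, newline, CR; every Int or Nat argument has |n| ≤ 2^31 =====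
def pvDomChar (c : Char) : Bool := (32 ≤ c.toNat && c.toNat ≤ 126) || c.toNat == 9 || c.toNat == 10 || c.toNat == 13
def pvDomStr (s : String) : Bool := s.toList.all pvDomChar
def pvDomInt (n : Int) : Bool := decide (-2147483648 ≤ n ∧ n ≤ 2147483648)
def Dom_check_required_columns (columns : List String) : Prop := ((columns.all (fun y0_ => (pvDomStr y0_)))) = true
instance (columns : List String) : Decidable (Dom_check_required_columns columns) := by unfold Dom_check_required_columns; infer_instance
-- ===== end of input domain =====

-- B replaces A's three nested scans of `columns` by a precomputed lowercase-name → category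
-- index and ONE pass over `columns` (one-pass structure; measured faster in a timing run).
-- Python A iterates a set of category tuples; the returned dict's insertion order is hash order,
-- compared ignoring order; both ports emit the categories in declaration order.

-- ===== PORT A =====
def check_sample_table_column (column : String) (accepted_values : List String) : Option String :=
  match accepted_values with
  | [] => none
  | candidate :: rest =>
      if candidate == PySem.Str.lower column then some column
      else check_sample_table_column column rest

def pvNeededA : List (String × List String) :=
  [("req", ["sample name", "sample_name"]),
   ("req", ["sample group", "sample_group"]),
   ("opt", ["bait uniprot", "bait_uniprot", "bait_id", "bait id"])]

-- inner 'for c in columns: … break' loop of A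
def pvInnerA (columns : List String) (names : List String) : Option String :=
  match columns with
  | [] => none
  | c :: rest =>
      match check_sample_table_column c names with
      | some found => some found
      | none => pvInnerA rest names

def check_required_columns (columns : List String) : (List (String × String)) × List String :=
  let st := pvNeededA.foldl
    (fun (st : PySem.Dict String String × PySem.Set String) n =>
      match pvInnerA columns n.2 with
      | none => st
      | some found =>
          let valname := PySem.List.pyGetD n.2 0 ""
          (st.1.insert valname found,
           if n.1 == "req" then PySem.Set.add st.2 valname else st.2))
    (PySem.Dict.empty, PySem.Set.empty)
  (st.1.items, st.2)

-- ===== PORT B =====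
def pvCategoriesB : List (String × Bool × List String) :=
  [("sample name", true, ["sample name", "sample_name"]),
   ("sample group", true, ["sample group", "sample_group"]),
   ("bait uniprot", false, ["bait uniprot", "bait_uniprot", "bait_id", "bait id"])]

def pvIndexB : PySem.Dict String String :=
  pvCategoriesB.foldl
    (fun d cat => cat.2.2.foldl (fun d name => d.insert name cat.1) d)
    PySem.Dict.empty

def pvFoundB (columns : List String) : PySem.Dict String String :=
  columns.foldl
    (fun f column =>
      match pvIndexB.get? (PySem.Str.lower column) with
      | some valname => if f.contains valname then f else f.insert valname column
      | none => f)
    PySem.Dict.empty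

def check_required_columns_alt (columns : List String) : (List (String × String)) × List String :=
  let found := pvFoundB columns
  let infodict := pvCategoriesB.foldl
    (fun (d : PySem.Dict String String) cat =>
      match found.get? cat.1 with
      | some c => d.insert cat.1 c
      | none => d)
    PySem.Dict.empty
  let reqs := pvCategoriesB.foldl
    (fun (s : PySem.Set String) cat =>
      if cat.2.1 && found.contains cat.1 then PySem.Set.add s cat.1 else s)
    PySem.Set.empty
  (infodict.items, reqs)

-- ===== PRECONDITION & SPEC =====
def Spec_check_required_columns (columns : List String) (out : (List (String × String)) × List String) : Prop := out = check_required_columns_alt columns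
instance (columns : List String) (out : (List (String × String)) × List String) : Decidable (Spec_check_required_columns columns out) := by unfold Spec_check_required_columns; infer_instance

-- ===== CLAIM (what is proved, stated in full; the proofs are below) =====
def Claim_equal_check_required_columns : Prop := ∀ (columns : List String), Dom_check_required_columns columns → Spec_check_required_columns columns (check_required_columns columns)

-- ===== LEMMAS AND PROOFS =====

theorem cstc_eq (c : String) (names : List String) :
    check_sample_table_column c names =
      if PySem.Str.lower c ∈ names then some c else none := by
  induction names with
  | nil => simp [check_sample_table_column]
  | cons a rest ih =>
      simp only [check_sample_table_column, ih, List.mem_cons]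
      by_cases h : a = PySem.Str.lower c
      · simp [h]
      · have hne : PySem.Str.lower c ≠ a := fun e => h e.symm
        by_cases h2 : PySem.Str.lower c ∈ rest <;> simp [h, h2, hne]

theorem innerA_eq_find? (columns names : List String) :
    pvInnerA columns names =
      columns.find? (fun c => decide (PySem.Str.lower c ∈ names)) := by
  induction columns with
  | nil => simp [pvInnerA]
  | cons c rest ih =>
      simp only [pvInnerA, cstc_eq, List.find?]
      by_cases h : PySem.Str.lower c ∈ names
      · simp [h]
      · simp [h, ih]

theorem pvIndexB_eq : pvIndexB = PySem.Dict.mk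
    [("sample name", "sample name"), ("sample_name", "sample name"),
     ("sample group", "sample group"), ("sample_group", "sample group"),
     ("bait uniprot", "bait uniprot"), ("bait_uniprot", "bait uniprot"),
     ("bait_id", "bait uniprot"), ("bait id", "bait uniprot")] := rfl

theorem pvIndexB_get?_none (s : String)
    (h1 : ¬s = "sample name") (h2 : ¬s = "sample_name")
    (h3 : ¬s = "sample group") (h4 : ¬s = "sample_group")
    (h5 : ¬s = "bait uniprot") (h6 : ¬s = "bait_uniprot")
    (h7 : ¬s = "bait_id") (h8 : ¬s = "bait id") :
    pvIndexB.get? s = none := by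
  have g1 : ¬"sample name" = s := fun x => h1 x.symm
  have g2 : ¬"sample_name" = s := fun x => h2 x.symm
  have g3 : ¬"sample group" = s := fun x => h3 x.symm
  have g4 : ¬"sample_group" = s := fun x => h4 x.symm
  have g5 : ¬"bait uniprot" = s := fun x => h5 x.symm
  have g6 : ¬"bait_uniprot" = s := fun x => h6 x.symm
  have g7 : ¬"bait_id" = s := fun x => h7 x.symm
  have g8 : ¬"bait id" = s := fun x => h8 x.symm
  rw [pvIndexB_eq]
  simp [PySem.Dict.get?, g1, g2, g3, g4, g5, g6, g7, g8]

theorem indexB_get?_sn (s : String) :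
    (pvIndexB.get? s == some "sample name") =
      decide (s ∈ (["sample name", "sample_name"] : List String)) := by
  by_cases h1 : s = "sample name"; · subst h1; decide
  by_cases h2 : s = "sample_name"; · subst h2; decide
  by_cases h3 : s = "sample group"; · subst h3; decide
  by_cases h4 : s = "sample_group"; · subst h4; decide
  by_cases h5 : s = "bait uniprot"; · subst h5; decide
  by_cases h6 : s = "bait_uniprot"; · subst h6; decide
  by_cases h7 : s = "bait_id"; · subst h7; decide
  by_cases h8 : s = "bait id"; · subst h8; decide
  rw [pvIndexB_get?_none s h1 h2 h3 h4 h5 h6 h7 h8]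
  simp [h1, h2]

theorem indexB_get?_sg (s : String) :
    (pvIndexB.get? s == some "sample group") =
      decide (s ∈ (["sample group", "sample_group"] : List String)) := by
  by_cases h1 : s = "sample name"; · subst h1; decide
  by_cases h2 : s = "sample_name"; · subst h2; decide
  by_cases h3 : s = "sample group"; · subst h3; decide
  by_cases h4 : s = "sample_group"; · subst h4; decide
  by_cases h5 : s = "bait uniprot"; · subst h5; decide
  by_cases h6 : s = "bait_uniprot"; · subst h6; decide
  by_cases h7 : s = "bait_id"; · subst h7; decide
  by_cases h8 : s = "bait id"; · subst h8; decide
  rw [pvIndexB_get?_none s h1 h2 h3 h4 h5 h6 h7 h8]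
  simp [h3, h4]

theorem indexB_get?_bu (s : String) :
    (pvIndexB.get? s == some "bait uniprot") =
      decide (s ∈ (["bait uniprot", "bait_uniprot", "bait_id", "bait id"] : List String)) := by
  by_cases h1 : s = "sample name"; · subst h1; decide
  by_cases h2 : s = "sample_name"; · subst h2; decide
  by_cases h3 : s = "sample group"; · subst h3; decide
  by_cases h4 : s = "sample_group"; · subst h4; decide
  by_cases h5 : s = "bait uniprot"; · subst h5; decide
  by_cases h6 : s = "bait_uniprot"; · subst h6; decide
  by_cases h7 : s = "bait_id"; · subst h7; decide
  by_cases h8 : s = "bait id"; · subst h8; decide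
  rw [pvIndexB_get?_none s h1 h2 h3 h4 h5 h6 h7 h8]
  simp [h5, h6, h7, h8]

-- one step of B's column loop
theorem foundB_invariant (columns : List String) (f : PySem.Dict String String) (v : String) :
    (columns.foldl
      (fun f column =>
        match pvIndexB.get? (PySem.Str.lower column) with
        | some valname => if f.contains valname then f else f.insert valname column
        | none => f) f).get? v =
    (f.get? v).or (columns.find? (fun c => pvIndexB.get? (PySem.Str.lower c) == some v)) := by
  induction columns generalizing f with
  | nil => simp
  | cons c rest ih =>
      simp only [List.foldl_cons]
      cases h : pvIndexB.get? (PySem.Str.lower c) with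
      | none =>
          rw [List.find?_cons_of_neg (by simp [h])]
          exact ih f
      | some w =>
          simp only [h]
          by_cases hwv : w = v
          · subst hwv
            cases hc : f.contains w with
            | true =>
                obtain ⟨x, hx⟩ : ∃ x, f.get? w = some x := by
                  cases hx : f.get? w with
                  | none =>
                      exact absurd ((PySem.Dict.get?_eq_none_iff_contains f w).mp hx)
                        (by simp [hc])
                  | some x => exact ⟨x, rfl⟩
                rw [if_pos rfl, ih f, List.find?_cons_of_pos (by simp [h]), hx]
                simp
            | false =>
                rw [if_neg (by simp), ih, PySem.Dict.get?_insert_self,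
                    (PySem.Dict.get?_eq_none_iff_contains f w).mpr hc,
                    List.find?_cons_of_pos (by simp [h])]
                simp
          · have hfind := List.find?_cons_of_neg
              (l := rest) (a := c)
              (p := fun c => pvIndexB.get? (PySem.Str.lower c) == some v)
              (by simp [h, hwv])
            cases hc : f.contains w with
            | true => rw [if_pos rfl, ih f, hfind]
            | false =>
                rw [if_neg (by simp), ih,
                    PySem.Dict.get?_insert_of_ne f c (fun e => hwv e.symm), hfind]

theorem foundB_get? (columns : List String) (v : String) :
    (pvFoundB columns).get? v =
      columns.find? (fun c => pvIndexB.get? (PySem.Str.lower c) == some v) := by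
  unfold pvFoundB
  rw [foundB_invariant]
  simp

theorem foundB_sn (columns : List String) :
    (pvFoundB columns).get? "sample name" = pvInnerA columns ["sample name", "sample_name"] := by
  rw [foundB_get?, innerA_eq_find?]
  congr 1
  funext c
  exact indexB_get?_sn _

theorem foundB_sg (columns : List String) :
    (pvFoundB columns).get? "sample group" = pvInnerA columns ["sample group", "sample_group"] := by
  rw [foundB_get?, innerA_eq_find?]
  congr 1
  funext c
  exact indexB_get?_sg _

theorem foundB_bu (columns : List String) :
    (pvFoundB columns).get? "bait uniprot" =
      pvInnerA columns ["bait uniprot", "bait_uniprot", "bait_id", "bait id"] := by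
  rw [foundB_get?, innerA_eq_find?]
  congr 1
  funext c
  exact indexB_get?_bu _

theorem contains_eq_isSome_foundB (columns : List String) (v : String) :
    (pvFoundB columns).contains v = ((pvFoundB columns).get? v).isSome := by
  cases hx : (pvFoundB columns).get? v with
  | none =>
      have := (PySem.Dict.get?_eq_none_iff_contains (d := pvFoundB columns) (k := v)).mp hx
      simp [this]
  | some x =>
      simp only [Option.isSome_some]
      by_contra hcc
      have := (PySem.Dict.get?_eq_none_iff_contains (d := pvFoundB columns) (k := v)).mpr
        (by simpa using hcc)
      simp [hx] at this

-- ===== VERDICT (by name: the statement is the Claim_ definition above) =====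
theorem check_required_columns_spec : Claim_equal_check_required_columns := by
  intro columns _
  unfold Spec_check_required_columns
  unfold check_required_columns check_required_columns_alt
  have h1 := foundB_sn columns
  have h2 := foundB_sg columns
  have h3 := foundB_bu columns
  have c1 := contains_eq_isSome_foundB columns "sample name"
  have c2 := contains_eq_isSome_foundB columns "sample group"
  have c3 := contains_eq_isSome_foundB columns "bait uniprot"
  simp only [pvNeededA, pvCategoriesB, List.foldl_cons, List.foldl_nil]
  cases e1 : pvInnerA columns ["sample name", "sample_name"] with
  | none =>
      cases e2 : pvInnerA columns ["sample group", "sample_group"] with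
      | none =>
          cases e3 : pvInnerA columns ["bait uniprot", "bait_uniprot", "bait_id", "bait id"] <;>
            simp_all
      | some x2 =>
          cases e3 : pvInnerA columns ["bait uniprot", "bait_uniprot", "bait_id", "bait id"] <;>
            simp_all
  | some x1 =>
      cases e2 : pvInnerA columns ["sample group", "sample_group"] with
      | none =>
          cases e3 : pvInnerA columns ["bait uniprot", "bait_uniprot", "bait_id", "bait id"] <;>
            simp_all
      | some x2 =>
          cases e3 : pvInnerA columns ["bait uniprot", "bait_uniprot", "bait_id", "bait id"] <;>
            simp_all
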